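-- pv_equiv track=rewrite | github.com/BiomedSciAI/fuse-drug | fusedrug/data/protein/ops/augment.py | extract_active_sites_info
-- ===== SOURCE A (Python) =====
-- def extract_active_sites_info(aligned_seq:str):
--     '''
--     processes and extracts useful information from an aligned active site sequence,
--     expects low case amino acids to be outside of the active site and high case amino acids to be inside it
--     '''
--     non_active_sites = ''
--     active_sites = ''
--     #total_len = len(aligned_seq)
--     prev_was_highcase = False
--     for c in aligned_seq:
--         next_is_highcase = c<='Z'
--         if next_is_highcase ^ prev_was_highcase:
--             if next_is_highcase:
--                 active_sites += '#'
--             else: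
--                 non_active_sites += '#'
--
--         if next_is_highcase:
--             active_sites += c
--             prev_was_highcase = True
--         else:
--             non_active_sites += c
--             prev_was_highcase = False
--
--     non_active_sites = [_ for _ in non_active_sites.split('#') if _!='']
--     active_sites = [_ for _ in active_sites.split('#') if _!='']
--
--     if aligned_seq[0]<='Z':
--         zip_obj = zip(active_sites, non_active_sites)
--     else:
--         zip_obj = zip(non_active_sites, active_sites)
--
--     all_seqs = [i  for one_tuple in zip_obj for i in one_tuple]
--
--     if len(active_sites) > len(non_active_sites):
--         assert len(active_sites) == len(non_active_sites)+ 1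
--         all_seqs.append(active_sites[-1])
--     elif len(active_sites) < len(non_active_sites):
--         assert len(active_sites) + 1 == len(non_active_sites)
--         all_seqs.append(non_active_sites[-1])
--
--     return aligned_seq, non_active_sites, active_sites, all_seqs
-- ===== SOURCE B (Python) =====
-- def extract_active_sites_info(aligned_seq: str):
--     '''
--     Single grouping pass: collect maximal same-case runs, then partition them.
--     (High-case = c <= 'Z', as in the original.)
--     '''
--     groups = []  # list of [is_highcase, run-chars]
--     for c in aligned_seq:
--         k = c <= 'Z'
--         if groups and groups[-1][0] == k:
--             groups[-1][1].append(c)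
--         else:
--             groups.append([k, [c]])
--     all_seqs = [''.join(chs) for _, chs in groups]
--     active_sites = [''.join(chs) for k, chs in groups if k]
--     non_active_sites = [''.join(chs) for k, chs in groups if not k]
--     return aligned_seq, non_active_sites, active_sites, all_seqs
-- ===== Notes on version B (the rewrite author's own statement) =====
-- stated objective: simpler
-- what changed: Replaces A's '#'-sentinel pipeline (interleave markers into two accumulated strings, split on '#', re-zip and re-append) by one grouping pass that collects maximal same-case runs and then partitions them into active/non-active lists.
-- outside the precondition, e.g. on extract_active_sites_info('a#'): A returns ('a#', ['a'], [], ['a']), B returns ('a#', ['a'], ['#'], ['a', '#']); on extract_active_sites_info('a#b'): A raises AssertionError, B returns ('a#b', ['a', 'b'], ['#'], ['a', '#', 'b']); on extract_active_sites_info('#'): A returns ('#', [], [], []), B returns ('#', [], ['#'], ['#'])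
import Mathlib
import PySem

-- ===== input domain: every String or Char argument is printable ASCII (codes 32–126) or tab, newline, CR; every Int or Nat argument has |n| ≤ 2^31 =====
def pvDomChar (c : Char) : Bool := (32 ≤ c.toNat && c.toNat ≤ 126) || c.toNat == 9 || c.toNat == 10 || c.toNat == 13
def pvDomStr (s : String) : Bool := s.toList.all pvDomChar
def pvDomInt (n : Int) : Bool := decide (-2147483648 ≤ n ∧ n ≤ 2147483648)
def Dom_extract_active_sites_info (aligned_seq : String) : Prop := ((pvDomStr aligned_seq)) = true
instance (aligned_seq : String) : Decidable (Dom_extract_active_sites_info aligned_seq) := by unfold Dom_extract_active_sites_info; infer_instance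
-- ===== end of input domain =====

-- B replaces A's '#'-marker concatenate/split pipeline by a single grouping pass into
-- maximal same-case runs that are then partitioned (objective: simpler).


-- ===== PORT A =====
-- c <= 'Z'
def pvKeyA (c : Char) : Bool := decide (c ≤ 'Z')

-- one iteration of A's for-loop; the two accumulated Python strings are carried as
-- List Char (Python '+=' on str is append; exact on this domain)
def pvStepA (st : List Char × List Char × Bool) (c : Char) : List Char × List Char × Bool :=
  let non := st.1
  let act := st.2.1
  let prev := st.2.2
  let next := pvKeyA c
  let non2 := if xor next prev && !next then non ++ ['#'] else non
  let act2 := if xor next prev && next then act ++ ['#'] else act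
  if next then (non2, act2 ++ [c], true) else (non2 ++ [c], act2, false)

-- [_ for _ in s.split('#') if _ != ''] (filtering the empty pieces on the char-list side)
def pvSplitHash (s : List Char) : List String :=
  ((PySem.Chars.splitOn s ['#']).filter (fun x => x ≠ [])).map String.ofList

def extract_active_sites_info (aligned_seq : String) : String × List String × List String × List String :=
  let st := aligned_seq.toList.foldl pvStepA ([], [], false)
  let nonL := pvSplitHash st.1
  let actL := pvSplitHash st.2.1
  -- aligned_seq[0] <= 'Z'; Python raises IndexError on "", which Pre_ excludes
  let firstHigh := match PySem.Str.pyGet? aligned_seq 0 with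
    | some c => pvKeyA c
    | none => false
  let zipped := if firstHigh then actL.zip nonL else nonL.zip actL
  let base := zipped.flatMap (fun p => [p.1, p.2])
  -- the asserts hold on every input Pre_ admits (proved below: run counts differ by ≤ 1);
  -- xs[-1] on the provably nonempty list is its last element
  let allL :=
    if nonL.length < actL.length then base ++ actL.getLast?.toList
    else if actL.length < nonL.length then base ++ nonL.getLast?.toList
    else base
  (aligned_seq, nonL, actL, allL)

-- ===== PORT B =====
def pvKeyB (c : Char) : Bool := decide (c ≤ 'Z')

-- Source B's loop body: extend the last run if the case matches, else open a new run
def pvAppendRun (gs : List (Bool × List Char)) (c : Char) : List (Bool × List Char) :=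
  match gs with
  | [] => [(pvKeyB c, [c])]
  | [g] => if g.1 == pvKeyB c then [(g.1, g.2 ++ [c])] else [g, (pvKeyB c, [c])]
  | g :: rest => g :: pvAppendRun rest c

def extract_active_sites_info_alt (aligned_seq : String) : String × List String × List String × List String :=
  let gs := aligned_seq.toList.foldl pvAppendRun []
  let allSeqs := gs.map (fun g => String.ofList g.2)
  let act := (gs.filter (fun g => g.1)).map (fun g => String.ofList g.2)
  let non := (gs.filter (fun g => !g.1)).map (fun g => String.ofList g.2)
  (aligned_seq, non, act, allSeqs)

-- ===== PRECONDITION & SPEC =====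
-- Pre_ restricts to the function's natural domain, aligned amino-acid sequences: it excludes
-- the empty string (A raises IndexError at aligned_seq[0]) and strings containing '#', A's
-- internal run-separator sentinel, on which A either fails its asserts (AssertionError) or
-- returns values with the '#' pieces respliced away.
def Pre_extract_active_sites_info (aligned_seq : String) : Prop :=
  aligned_seq ≠ "" ∧ ¬ ('#' ∈ aligned_seq.toList)
instance (aligned_seq : String) : Decidable (Pre_extract_active_sites_info aligned_seq) := by
  unfold Pre_extract_active_sites_info; infer_instance

def pvWitness_extract_active_sites_info : String := "aBCd"

def Spec_extract_active_sites_info (aligned_seq : String) (out : String × List String × List String × List String) : Prop := out = extract_active_sites_info_alt aligned_seq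
instance (aligned_seq : String) (out : String × List String × List String × List String) : Decidable (Spec_extract_active_sites_info aligned_seq out) := by unfold Spec_extract_active_sites_info; infer_instance

-- ===== CLAIM (what is proved, stated in full; the proofs are below) =====
def Claim_equal_extract_active_sites_info : Prop := ∀ (aligned_seq : String), Dom_extract_active_sites_info aligned_seq → Pre_extract_active_sites_info aligned_seq → Spec_extract_active_sites_info aligned_seq (extract_active_sites_info aligned_seq)

-- ===== LEMMAS AND PROOFS =====

-- the maximal same-case runs of a character list (the common specification both ports meet)
def pvRuns : List Char → List (Bool × List Char)
  | [] => []
  | c :: cs =>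
    (pvKeyA c, c :: cs.takeWhile (fun d => pvKeyA d == pvKeyA c)) ::
      pvRuns (cs.dropWhile (fun d => pvKeyA d == pvKeyA c))
  termination_by cs => cs.length
  decreasing_by simpa using Nat.lt_succ_of_le (List.length_dropWhile_le _ _)

-- structural model of str.split('#')
def pvSplit (pre : List Char) : List Char → List (List Char)
  | [] => [pre]
  | c :: t => if c = '#' then pre :: pvSplit [] t else pvSplit (pre ++ [c]) t

-- the two marker strings A accumulates, computed run by run (p = prev_was_highcase)
def pvEmit (p : Bool) : List (Bool × List Char) → List Char × List Char
  | [] => ([], [])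
  | (k, r) :: rest =>
    let e := pvEmit k rest
    if k then (e.1, (if p then [] else ['#']) ++ r ++ e.2)
    else ((if p then ['#'] else []) ++ r ++ e.1, e.2)

def pvFinal (p : Bool) : List (Bool × List Char) → Bool
  | [] => p
  | (k, _) :: rest => pvFinal k rest

-- k-runs of rs, as strings
def pvSelK (k : Bool) (rs : List (Bool × List Char)) : List String :=
  (rs.filter (fun g => g.1 == k)).map (fun g => String.ofList g.2)

-- A's zip-interleave-and-append-leftover combination
def pvInter (X Y : List String) : List String :=
  (X.zip Y).flatMap (fun p => [p.1, p.2]) ++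
    (if Y.length < X.length then X.getLast?.toList
     else if X.length < Y.length then Y.getLast?.toList else [])

-- ---- splitOn bridge ----
theorem pvGo_zero (l cur : List Char) (acc : List (List Char)) :
    PySem.Chars.splitOn.go ['#'] 0 l cur acc = ((cur.reverse ++ l) :: acc).reverse := by
  rw [PySem.Chars.splitOn.go]

theorem pvGo_nil (fuel : Nat) (cur : List Char) (acc : List (List Char)) :
    PySem.Chars.splitOn.go ['#'] (fuel+1) [] cur acc = (cur.reverse :: acc).reverse := by
  rw [PySem.Chars.splitOn.go]; simp

theorem pvGo_hash (fuel : Nat) (rest cur : List Char) (acc : List (List Char)) :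
    PySem.Chars.splitOn.go ['#'] (fuel+1) ('#'::rest) cur acc =
      PySem.Chars.splitOn.go ['#'] fuel rest [] (cur.reverse :: acc) := by
  rw [PySem.Chars.splitOn.go]; simp [List.isPrefixOf]

theorem pvGo_other (fuel : Nat) (c : Char) (rest cur : List Char) (acc : List (List Char))
    (h : c ≠ '#') :
    PySem.Chars.splitOn.go ['#'] (fuel+1) (c::rest) cur acc =
      PySem.Chars.splitOn.go ['#'] fuel rest (c::cur) acc := by
  rw [PySem.Chars.splitOn.go]; simp [List.isPrefixOf, Ne.symm h]

theorem pvGo_eq (fuel : Nat) : ∀ (l cur : List Char) (acc : List (List Char)), l.length ≤ fuel →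
    PySem.Chars.splitOn.go ['#'] fuel l cur acc = acc.reverse ++ pvSplit cur.reverse l := by
  induction fuel with
  | zero =>
    intro l cur acc h
    have hl : l = [] := List.eq_nil_of_length_eq_zero (Nat.le_zero.mp h)
    subst hl
    rw [pvGo_zero]
    simp [pvSplit]
  | succ fuel ih =>
    intro l cur acc h
    match l with
    | [] =>
      rw [pvGo_nil]
      simp [pvSplit]
    | c :: rest =>
      by_cases hc : c = '#'
      · subst hc
        rw [pvGo_hash, ih rest [] (cur.reverse :: acc) (by simpa using Nat.le_of_succ_le_succ h)]
        simp [pvSplit]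
      · rw [pvGo_other fuel c rest cur acc hc,
          ih rest (c :: cur) acc (by simpa using Nat.le_of_succ_le_succ h)]
        simp [pvSplit, hc]

theorem pvSplitOn_eq (s : List Char) : PySem.Chars.splitOn s ['#'] = pvSplit [] s := by
  show PySem.Chars.splitOn.go ['#'] (s.length + 1) s [] [] = pvSplit [] s
  rw [pvGo_eq (s.length + 1) s [] [] (Nat.le_succ _)]
  simp

theorem pvSplit_shape : ∀ (a pre : List Char),
    pvSplit pre a = (pre ++ (pvSplit [] a).headI) :: (pvSplit [] a).tail := by
  intro a
  induction a with
  | nil => intro pre; simp [pvSplit]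
  | cons c t ih =>
    intro pre
    by_cases hc : c = '#'
    · subst hc; simp [pvSplit]
    · simp only [pvSplit, hc, if_false, List.nil_append]
      rw [ih (pre ++ [c]), ih [c]]
      simp

theorem pvSplit_append (r : List Char) (hr : '#' ∉ r) :
    ∀ (pre t : List Char), pvSplit pre (r ++ t) = pvSplit (pre ++ r) t := by
  induction r with
  | nil => intro pre t; simp
  | cons c r ih =>
    intro pre t
    have hc : c ≠ '#' := fun h => hr (h ▸ List.mem_cons_self ..)
    simp only [List.cons_append, pvSplit, hc, if_false]
    rw [ih (fun h => hr (List.mem_cons_of_mem _ h)) (pre ++ [c]) t]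
    simp

-- ---- runs properties ----
theorem pvRuns_flat (cs : List Char) : (pvRuns cs).flatMap (fun g => g.2) = cs := by
  induction cs using pvRuns.induct with
  | case1 => simp [pvRuns]
  | case2 c cs ih =>
    rw [pvRuns]
    simp only [List.flatMap_cons, ih]
    simp [List.takeWhile_append_dropWhile]

theorem pvRuns_nonempty (cs : List Char) : ∀ g ∈ pvRuns cs, g.2 ≠ [] := by
  induction cs using pvRuns.induct with
  | case1 => simp [pvRuns]
  | case2 c cs ih =>
    rw [pvRuns]
    intro g hg
    rcases List.mem_cons.mp hg with rfl | hg
    · simp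
    · exact ih g hg

theorem pvRuns_homog (cs : List Char) : ∀ g ∈ pvRuns cs, ∀ c ∈ g.2, pvKeyA c = g.1 := by
  induction cs using pvRuns.induct with
  | case1 => simp [pvRuns]
  | case2 c cs ih =>
    rw [pvRuns]
    intro g hg
    rcases List.mem_cons.mp hg with rfl | hg
    · intro d hd
      rcases List.mem_cons.mp hd with rfl | hd
      · rfl
      · simpa using List.mem_takeWhile_imp hd
    · exact ih g hg

theorem pvRuns_head_key (cs : List Char) (g : Bool × List Char)
    (hg : (pvRuns cs).head? = some g) : ∃ d t, cs = d :: t ∧ g.1 = pvKeyA d := by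
  match cs with
  | [] => rw [pvRuns] at hg; simp at hg
  | d :: t =>
    rw [pvRuns] at hg
    simp only [List.head?_cons, Option.some_inj] at hg
    exact ⟨d, t, rfl, by rw [← hg]⟩

theorem pvDropWhile_head_false (p : Char → Bool) (l t : List Char) (d : Char)
    (h : l.dropWhile p = d :: t) : p d = false := by
  have := List.head_dropWhile_not p (l := l) (by simp [h])
  simp only [h, List.head_cons] at this
  simpa using this

theorem pvRuns_chain (cs : List Char) : List.IsChain (fun a b => a.1 ≠ b.1) (pvRuns cs) := by
  induction cs using pvRuns.induct with
  | case1 => rw [pvRuns]; exact List.IsChain.nil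
  | case2 c cs ih =>
    rw [pvRuns]
    refine List.IsChain.cons ih ?_
    intro g hg
    obtain ⟨d, t, hd, hkey⟩ := pvRuns_head_key _ g hg
    have hnp := pvDropWhile_head_false _ _ _ _ hd
    simp only [hkey]
    simp only [beq_eq_false_iff_ne, ne_eq] at hnp
    simp only [ne_eq]
    exact fun h => hnp h.symm

theorem pvRuns_mem (cs : List Char) : ∀ g ∈ pvRuns cs, ∀ c ∈ g.2, c ∈ cs := by
  intro g hg c hc
  rw [← pvRuns_flat cs]
  exact List.mem_flatMap.mpr ⟨g, hg, hc⟩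

-- ---- B computes the runs ----
theorem pvAppendRun_snoc (gs : List (Bool × List Char)) (g : Bool × List Char) (c : Char) :
    pvAppendRun (gs ++ [g]) c =
      gs ++ (if g.1 == pvKeyB c then [(g.1, g.2 ++ [c])] else [g, (pvKeyB c, [c])]) := by
  induction gs with
  | nil => simp [pvAppendRun]
  | cons g' gs ih =>
    rcases gs with _ | ⟨g'', gs⟩
    · simp only [List.nil_append, List.singleton_append, List.cons_append]
      rw [show pvAppendRun (g' :: [g]) c = g' :: pvAppendRun [g] c from rfl]
      simp [pvAppendRun]
    · rw [show (g' :: g'' :: gs) ++ [g] = g' :: ((g'' :: gs) ++ [g]) from rfl,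
        show pvAppendRun (g' :: ((g'' :: gs) ++ [g])) c
          = g' :: pvAppendRun ((g'' :: gs) ++ [g]) c from rfl, ih]
      simp

theorem pvFoldB_consume : ∀ (cs : List Char) (gs : List (Bool × List Char)) (k : Bool) (r : List Char),
    cs.foldl pvAppendRun (gs ++ [(k, r)]) =
      gs ++ (k, r ++ cs.takeWhile (fun d => pvKeyA d == k)) ::
        pvRuns (cs.dropWhile (fun d => pvKeyA d == k)) := by
  intro cs
  induction cs with
  | nil => intro gs k r; simp [show pvRuns [] = [] from by rw [pvRuns]]
  | cons c cs ih =>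
    intro gs k r
    by_cases hk : pvKeyA c = k
    · have hb : ((k, r).1 == pvKeyB c) = true := by
        show (k == pvKeyB c) = true
        rw [show pvKeyB c = pvKeyA c from rfl, hk]
        simp
      rw [List.foldl_cons, pvAppendRun_snoc, if_pos hb]
      rw [show gs ++ [((k, r).1, (k, r).2 ++ [c])] = gs ++ [(k, r ++ [c])] from rfl, ih]
      simp [List.takeWhile_cons, List.dropWhile_cons, hk]
    · have hb : ((k, r).1 == pvKeyB c) = false := by
        simp only [pvKeyB, pvKeyA] at hk ⊢
        simp only [beq_eq_false_iff_ne, ne_eq]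
        exact fun h => hk h.symm
      rw [List.foldl_cons, pvAppendRun_snoc, if_neg (by simp [hb])]
      rw [show gs ++ [(k, r), (pvKeyB c, [c])] = (gs ++ [(k, r)]) ++ [(pvKeyB c, [c])] from by simp,
        show pvKeyB c = pvKeyA c from rfl, ih]
      have ht : (c :: cs).takeWhile (fun d => pvKeyA d == k) = [] := by
        simp [hk]
      have hdw : (c :: cs).dropWhile (fun d => pvKeyA d == k) = c :: cs := by
        simp [hk]
      have hruns : pvRuns (c :: cs)
          = (pvKeyA c, c :: cs.takeWhile (fun d => pvKeyA d == pvKeyA c)) ::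
            pvRuns (cs.dropWhile (fun d => pvKeyA d == pvKeyA c)) := by rw [pvRuns]
      rw [ht, hdw, hruns]
      simp

theorem pvFoldB_runs (cs : List Char) : cs.foldl pvAppendRun [] = pvRuns cs := by
  rcases cs with _ | ⟨c, cs⟩
  · rw [pvRuns]; rfl
  · rw [List.foldl_cons,
      show pvAppendRun [] c = [] ++ [(pvKeyA c, [c])] from rfl,
      pvFoldB_consume, pvRuns]
    simp

-- ---- A's loop computes the marker strings ----
theorem pvFold_same (k : Bool) : ∀ (r : List Char), (∀ c ∈ r, pvKeyA c = k) →
    ∀ n a, r.foldl pvStepA (n, a, k) = (if k then (n, a ++ r, k) else (n ++ r, a, k)) := by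
  intro r
  induction r with
  | nil => intro h n a; cases k <;> simp
  | cons c r ih =>
    intro h n a
    have hc : pvKeyA c = k := h c (List.mem_cons_self ..)
    have hr := fun d hd => h d (List.mem_cons_of_mem _ hd)
    cases k
    · rw [List.foldl_cons,
        show pvStepA (n, a, false) c = (n ++ [c], a, false) from by simp [pvStepA, hc],
        ih hr (n ++ [c]) a]
      simp
    · rw [List.foldl_cons,
        show pvStepA (n, a, true) c = (n, a ++ [c], true) from by simp [pvStepA, hc],
        ih hr n (a ++ [c])]
      simp

theorem pvFold_run (k : Bool) (r : List Char) (hne : r ≠ []) (hk : ∀ c ∈ r, pvKeyA c = k) (n a : List Char) (p : Bool) :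
    r.foldl pvStepA (n, a, p) =
      (if k then (n, a ++ ((if p then [] else ['#']) ++ r), true)
       else (n ++ ((if p then ['#'] else []) ++ r), a, false)) := by
  rcases r with _ | ⟨c, r⟩
  · exact absurd rfl hne
  have hc : pvKeyA c = k := hk c (List.mem_cons_self ..)
  have hr := fun d hd => hk d (List.mem_cons_of_mem _ hd)
  cases k
  · rw [List.foldl_cons,
      show pvStepA (n, a, p) c = (n ++ (if p then ['#'] else []) ++ [c], a, false) from by
        cases p <;> simp [pvStepA, hc],
      pvFold_same false r hr]
    cases p <;> simp
  · rw [List.foldl_cons,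
      show pvStepA (n, a, p) c = (n, a ++ (if p then [] else ['#']) ++ [c], true) from by
        cases p <;> simp [pvStepA, hc],
      pvFold_same true r hr]
    cases p <;> simp

theorem pvFold_runs : ∀ (rs : List (Bool × List Char)) (n a : List Char) (p : Bool),
    (∀ g ∈ rs, g.2 ≠ []) → (∀ g ∈ rs, ∀ c ∈ g.2, pvKeyA c = g.1) →
    (rs.flatMap (fun g => g.2)).foldl pvStepA (n, a, p) =
      (n ++ (pvEmit p rs).1, a ++ (pvEmit p rs).2, pvFinal p rs) := by
  intro rs
  induction rs with
  | nil => intro n a p _ _; simp [pvEmit, pvFinal]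
  | cons g rest ih =>
    intro n a p h1 h2
    obtain ⟨k, r⟩ := g
    have hne : r ≠ [] := h1 (k, r) (List.mem_cons_self ..)
    have hk : ∀ c ∈ r, pvKeyA c = k := h2 (k, r) (List.mem_cons_self ..)
    have h1' := fun g hg => h1 g (List.mem_cons_of_mem _ hg)
    have h2' := fun g hg => h2 g (List.mem_cons_of_mem _ hg)
    rw [List.flatMap_cons, List.foldl_append, pvFold_run k r hne hk n a p]
    cases k
    · rw [if_neg (by simp), ih _ _ _ h1' h2']
      simp [pvEmit, pvFinal]
    · rw [if_pos rfl, ih _ _ _ h1' h2']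
      simp [pvEmit, pvFinal]

-- ---- splitting the marker strings recovers the runs ----
theorem pvSplit_act : ∀ (rs : List (Bool × List Char)) (p : Bool),
    (∀ g ∈ rs, '#' ∉ g.2) → List.IsChain (fun a b => a.1 ≠ b.1) rs →
    (∀ g, rs.head? = some g → g.1 = true → p = false) →
    pvSplit [] (pvEmit p rs).2 = [] :: (rs.filter (fun g => g.1 == true)).map (fun g => g.2) := by
  intro rs
  induction rs with
  | nil => intro p _ _ _; simp [pvEmit, pvSplit]
  | cons g rest ih =>
    intro p h1 h2 h3
    obtain ⟨k, r⟩ := g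
    have hr : '#' ∉ r := h1 (k, r) (List.mem_cons_self ..)
    have h1' := fun g hg => h1 g (List.mem_cons_of_mem _ hg)
    have h2' : List.IsChain (fun a b => a.1 ≠ b.1) rest := h2.of_cons
    cases k
    · have ih' := ih false h1' h2' (fun g hg hgt => rfl)
      simp only [pvEmit]
      simpa using ih'
    · have hp : p = false := h3 (true, r) rfl rfl
      subst hp
      have ih' := ih true h1' h2' (fun g hg hgt => by
        have := h2.rel_head? hg
        simp [hgt] at this)
      rw [show (pvEmit false ((true, r) :: rest)).2 = '#' :: (r ++ (pvEmit true rest).2) from by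
          simp [pvEmit],
        show pvSplit [] ('#' :: (r ++ (pvEmit true rest).2))
          = [] :: pvSplit [] (r ++ (pvEmit true rest).2) from by simp [pvSplit],
        show pvSplit [] (r ++ (pvEmit true rest).2) = pvSplit ([] ++ r) (pvEmit true rest).2 from
          pvSplit_append r hr [] _,
        List.nil_append, pvSplit_shape _ r, ih']
      simp

theorem pvSplit_non_marked : ∀ (rs : List (Bool × List Char)) (p : Bool),
    (∀ g ∈ rs, '#' ∉ g.2) → List.IsChain (fun a b => a.1 ≠ b.1) rs →
    (∀ g, rs.head? = some g → g.1 = false → p = true) →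
    pvSplit [] (pvEmit p rs).1 = [] :: (rs.filter (fun g => g.1 == false)).map (fun g => g.2) := by
  intro rs
  induction rs with
  | nil => intro p _ _ _; simp [pvEmit, pvSplit]
  | cons g rest ih =>
    intro p h1 h2 h3
    obtain ⟨k, r⟩ := g
    have hr : '#' ∉ r := h1 (k, r) (List.mem_cons_self ..)
    have h1' := fun g hg => h1 g (List.mem_cons_of_mem _ hg)
    have h2' : List.IsChain (fun a b => a.1 ≠ b.1) rest := h2.of_cons
    cases k
    · have hp : p = true := h3 (false, r) rfl rfl
      subst hp
      have ih' := ih false h1' h2' (fun g hg hgt => by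
        have := h2.rel_head? hg
        simp [hgt] at this)
      rw [show (pvEmit true ((false, r) :: rest)).1 = '#' :: (r ++ (pvEmit false rest).1) from by
          simp [pvEmit],
        show pvSplit [] ('#' :: (r ++ (pvEmit false rest).1))
          = [] :: pvSplit [] (r ++ (pvEmit false rest).1) from by simp [pvSplit],
        show pvSplit [] (r ++ (pvEmit false rest).1) = pvSplit ([] ++ r) (pvEmit false rest).1 from
          pvSplit_append r hr [] _,
        List.nil_append, pvSplit_shape _ r, ih']
      simp
    · have ih' := ih true h1' h2' (fun g hg hgt => rfl)
      simp only [pvEmit]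
      simpa using ih' 

theorem pvSplitHash_act (rs : List (Bool × List Char))
    (h1 : ∀ g ∈ rs, '#' ∉ g.2) (h2 : List.IsChain (fun a b => a.1 ≠ b.1) rs) (h3 : ∀ g ∈ rs, g.2 ≠ []) :
    pvSplitHash (pvEmit false rs).2 = pvSelK true rs := by
  have hL : ∀ x ∈ (rs.filter (fun g => g.1 == true)).map (fun g => g.2), ¬ x = [] := by
    intro x hx
    obtain ⟨g, hg, rfl⟩ := List.mem_map.mp hx
    exact h3 g (List.mem_of_mem_filter hg)
  unfold pvSplitHash
  rw [pvSplitOn_eq, pvSplit_act rs false h1 h2 (fun g _ _ => rfl),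
    List.filter_cons_of_neg (by simp),
    List.filter_eq_self.mpr (by intro x hx; simpa using hL x hx)]
  simp [pvSelK]

theorem pvSplitHash_non (rs : List (Bool × List Char))
    (h1 : ∀ g ∈ rs, '#' ∉ g.2) (h2 : List.IsChain (fun a b => a.1 ≠ b.1) rs) (h3 : ∀ g ∈ rs, g.2 ≠ []) :
    pvSplitHash (pvEmit false rs).1 = pvSelK false rs := by
  have hL : ∀ x ∈ (rs.filter (fun g => g.1 == false)).map (fun g => g.2), ¬ x = [] := by
    intro x hx
    obtain ⟨g, hg, rfl⟩ := List.mem_map.mp hx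
    exact h3 g (List.mem_of_mem_filter hg)
  rcases rs with _ | ⟨⟨k, r⟩, rest⟩
  · unfold pvSplitHash
    rw [show (pvEmit false ([] : List (Bool × List Char))).1 = [] from rfl, pvSplitOn_eq]
    simp [pvSplit, pvSelK]
  cases k
  · have hr : '#' ∉ r := h1 (false, r) (List.mem_cons_self ..)
    have h1' := fun g hg => h1 g (List.mem_cons_of_mem _ hg)
    have h2' : List.IsChain (fun a b => a.1 ≠ b.1) rest := h2.of_cons
    have hrest := pvSplit_non_marked rest false h1' h2' (fun g hg hf => by
      have := h2.rel_head? hg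
      simp [hf] at this)
    have hrne : r ≠ [] := h3 (false, r) (List.mem_cons_self ..)
    unfold pvSplitHash
    rw [pvSplitOn_eq,
      show (pvEmit false ((false, r) :: rest)).1 = r ++ (pvEmit false rest).1 from by
        simp [pvEmit],
      show pvSplit [] (r ++ (pvEmit false rest).1) = pvSplit ([] ++ r) (pvEmit false rest).1 from
        pvSplit_append r hr [] _,
      List.nil_append, pvSplit_shape _ r, hrest]
    simp only [List.headI_cons, List.tail_cons, List.append_nil]
    rw [List.filter_cons_of_pos (by simpa using hrne),
      List.filter_eq_self.mpr (by
        intro x hx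
        have hx' : x ∈ (rest.filter (fun g => g.1 == false)).map (fun g => g.2) := hx
        simp only [List.mem_map] at hx'
        obtain ⟨g, hg, rfl⟩ := hx'
        simpa using h3 g (List.mem_cons_of_mem _ (List.mem_of_mem_filter hg)))]
    simp [pvSelK]
  · unfold pvSplitHash
    rw [pvSplitOn_eq, pvSplit_non_marked _ false h1 h2 (fun g hg hf => by
      simp only [List.head?_cons, Option.some_inj] at hg
      rw [← hg] at hf
      simp at hf),
      List.filter_cons_of_neg (by simp),
      List.filter_eq_self.mpr (by intro x hx; simpa using hL x hx)]
    simp [pvSelK]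

-- ---- interleaving ----
theorem pvAlt_len : ∀ (rs : List (Bool × List Char)) (k : Bool),
    List.IsChain (fun a b => a.1 ≠ b.1) rs → (∀ g, rs.head? = some g → g.1 = k) →
    (rs.filter (fun g => g.1 == !k)).length ≤ (rs.filter (fun g => g.1 == k)).length ∧
    (rs.filter (fun g => g.1 == k)).length ≤ (rs.filter (fun g => g.1 == !k)).length + 1 := by
  intro rs
  induction rs with
  | nil => intro k _ _; simp
  | cons g rest ih =>
    intro k hch hhd
    have hk : g.1 = k := hhd g rfl
    have ih' := ih (!k) hch.of_cons (fun g' hg' => by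
      have h1 := hch.rel_head? hg'
      rw [hk] at h1
      cases hg1 : g'.1 <;> cases k <;> simp_all)
    have e1 : List.filter (fun x => x.1 == !k) (g :: rest)
        = List.filter (fun x => x.1 == !k) rest := by
      rw [List.filter_cons_of_neg (by simp [hk])]
    have e2 : List.filter (fun x => x.1 == k) (g :: rest)
        = g :: List.filter (fun x => x.1 == k) rest := by
      rw [List.filter_cons_of_pos (by simp [hk])]
    rw [e1, e2]
    rw [Bool.not_not] at ih'
    obtain ⟨ha, hb⟩ := ih'
    simp only [List.length_cons]
    omega

theorem pvInter_step : ∀ (n : Nat) (P Q : List String) (x : String),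
    P.length + Q.length ≤ n → P.length ≤ Q.length → Q.length ≤ P.length + 1 →
    pvInter (x :: P) Q = x :: pvInter Q P := by
  intro n
  induction n with
  | zero =>
    intro P Q x h h1 h2
    have hP : P = [] := by simpa using List.eq_nil_of_length_eq_zero (by omega)
    have hQ : Q = [] := by simpa using List.eq_nil_of_length_eq_zero (by omega)
    subst hP; subst hQ
    simp [pvInter]
  | succ n ih =>
    intro P Q x h h1 h2
    rcases P with _ | ⟨p, P'⟩
    · rcases Q with _ | ⟨q, Q'⟩
      · simp [pvInter]
      · have hQ' : Q' = [] := by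
          simp only [List.length_nil, List.length_cons] at h2
          exact List.eq_nil_of_length_eq_zero (by omega)
        subst hQ'
        simp [pvInter]
    · rcases Q with _ | ⟨q, Q'⟩
      · simp at h1
      · have hrec : pvInter (q :: Q') (p :: P') = q :: pvInter (p :: P') Q' := by
          apply ih Q' (p :: P') q
          · simp only [List.length_cons] at h h1 h2 ⊢; omega
          · simp only [List.length_cons] at h1 h2 ⊢; omega
          · simp only [List.length_cons] at h1 h2 ⊢; omega
        rw [hrec]
        simp only [pvInter, List.zip_cons_cons, List.flatMap_cons, List.length_cons]
        simp only [List.length_cons] at h1 h2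
        by_cases he : P'.length = Q'.length
        · rw [if_pos (by omega), if_pos (by omega)]
          simp [List.getLast?_cons]
        · rw [if_neg (by omega), if_neg (by omega), if_neg (by omega), if_neg (by omega)]
          simp

theorem pvInter_runs : ∀ (rs : List (Bool × List Char)) (k : Bool),
    List.IsChain (fun a b => a.1 ≠ b.1) rs → (∀ g, rs.head? = some g → g.1 = k) →
    pvInter (pvSelK k rs) (pvSelK (!k) rs) = rs.map (fun g => String.ofList g.2) := by
  intro rs
  induction rs with
  | nil => intro k _ _; simp [pvSelK, pvInter]
  | cons g rest ih =>
    intro k hch hhd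
    have hk : g.1 = k := hhd g rfl
    have hhd' : ∀ g', rest.head? = some g' → g'.1 = !k := fun g' hg' => by
      have h1 := hch.rel_head? hg'
      rw [hk] at h1
      cases hg1 : g'.1 <;> cases k <;> simp_all
    have hsel1 : pvSelK k (g :: rest) = String.ofList g.2 :: pvSelK k rest := by
      unfold pvSelK
      rw [List.filter_cons_of_pos (by simp [hk])]
      simp
    have hsel2 : pvSelK (!k) (g :: rest) = pvSelK (!k) rest := by
      unfold pvSelK
      rw [List.filter_cons_of_neg (by simp [hk])]
    have hlen := pvAlt_len rest (!k) hch.of_cons hhd'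
    rw [Bool.not_not] at hlen
    rw [hsel1, hsel2,
      pvInter_step ((pvSelK k rest).length + (pvSelK (!k) rest).length)
        (pvSelK k rest) (pvSelK (!k) rest) (String.ofList g.2) le_rfl
        (by simpa [pvSelK] using hlen.1) (by simpa [pvSelK] using hlen.2)]
    have ih2 := ih (!k) hch.of_cons hhd'
    rw [Bool.not_not] at ih2
    rw [ih2]
    simp

-- ===== VERDICT (by name: the statement is the Claim_ definition above) =====
theorem pvInter_eq_A_comb (non act : List String) (k : Bool) :
    (if non.length < act.length
      then ((if k then act.zip non else non.zip act).flatMap (fun p => [p.1, p.2])) ++ act.getLast?.toList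
      else if act.length < non.length
      then ((if k then act.zip non else non.zip act).flatMap (fun p => [p.1, p.2])) ++ non.getLast?.toList
      else (if k then act.zip non else non.zip act).flatMap (fun p => [p.1, p.2]))
    = if k then pvInter act non else pvInter non act := by
  cases k <;> unfold pvInter <;> split_ifs <;> first | rfl | omega | simp

theorem extract_active_sites_info_spec : Claim_equal_extract_active_sites_info := by
  intro s _ hpre
  obtain ⟨hne, hhash⟩ := hpre
  unfold Spec_extract_active_sites_info
  have hcs : s.toList ≠ [] := by simpa [String.toList_eq_nil_iff] using hne
  obtain ⟨c, cs', hc⟩ := List.exists_cons_of_ne_nil hcs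
  have hne' := pvRuns_nonempty s.toList
  have hhom := pvRuns_homog s.toList
  have hch := pvRuns_chain s.toList
  have hnh : ∀ g ∈ pvRuns s.toList, '#' ∉ g.2 :=
    fun g hg hm => hhash (pvRuns_mem _ g hg _ hm)
  have hfold : s.toList.foldl pvStepA ([], [], false)
      = ((pvEmit false (pvRuns s.toList)).1, (pvEmit false (pvRuns s.toList)).2,
          pvFinal false (pvRuns s.toList)) := by
    conv_lhs => rw [← pvRuns_flat s.toList]
    rw [pvFold_runs (pvRuns s.toList) [] [] false hne' hhom]
    simp
  have hact : pvSplitHash (pvEmit false (pvRuns s.toList)).2 = pvSelK true (pvRuns s.toList) :=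
    pvSplitHash_act _ hnh hch hne'
  have hnon : pvSplitHash (pvEmit false (pvRuns s.toList)).1 = pvSelK false (pvRuns s.toList) :=
    pvSplitHash_non _ hnh hch hne'
  have hfirst : PySem.Str.pyGet? s 0 = some c := by
    simp [pysem, hc]
  have hhd : ∀ g, (pvRuns s.toList).head? = some g → g.1 = pvKeyA c := by
    intro g hg
    obtain ⟨d, t, hd, hk⟩ := pvRuns_head_key _ g hg
    rw [hc] at hd
    obtain ⟨rfl, -⟩ := List.cons_eq_cons.mp hd
    exact hk
  have hinter := pvInter_runs (pvRuns s.toList) (pvKeyA c) hch hhd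
  have hB : extract_active_sites_info_alt s
      = (s, pvSelK false (pvRuns s.toList), pvSelK true (pvRuns s.toList),
          (pvRuns s.toList).map (fun g => String.ofList g.2)) := by
    unfold extract_active_sites_info_alt
    rw [pvFoldB_runs]
    simp [pvSelK]
  have hfold1 : (s.toList.foldl pvStepA ([], [], false)).1 = (pvEmit false (pvRuns s.toList)).1 := by
    rw [hfold]
  have hfold2 : (s.toList.foldl pvStepA ([], [], false)).2.1 = (pvEmit false (pvRuns s.toList)).2 := by
    rw [hfold]
  rw [hB]
  simp only [extract_active_sites_info]
  rw [hfold1, hfold2, hact, hnon, hfirst,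
    show (match some c with | some c => pvKeyA c | none => false) = pvKeyA c from rfl]
  have hcomb := pvInter_eq_A_comb (pvSelK false (pvRuns s.toList)) (pvSelK true (pvRuns s.toList))
    (pvKeyA c)
  cases hk : pvKeyA c
  · rw [hk] at hcomb hinter
    simp only [Bool.false_eq_true, if_false] at hcomb ⊢
    simp only [Bool.not_false] at hinter
    rw [hcomb, hinter]
  · rw [hk] at hcomb hinter
    simp only [if_true] at hcomb ⊢
    simp only [Bool.not_true] at hinter
    rw [hcomb, hinter]
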